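-- pv_equiv track=rewrite | github.com/AallynReed/TroveBot | cogs/Bot/utils.py | mr_to_points
-- ===== SOURCE A (Python) =====
-- import math
--
-- def mr_to_points(level):
--     points = 0
--     i = 1
--     while True:
--         i += 1
--         if i <= 5:
--             increment = 25
--         elif 6 <= i <= 10:
--             increment = 50
--         elif 11 <= i <= 20:
--             increment = 75
--         elif 21 <= i <= 300:
--             increment = 100
--         elif i > 300:
--             increment = 150 + math.ceil((i - 300) * 0.5)
--         if i == level+1:
--             if i-1 > 300:
--                 increment = 150 + math.ceil((i-1 - 300) * 0.5)
--             break
--         points += increment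
--     return increment, points
-- ===== SOURCE B (Python) =====
-- def _next_increment(level):
--     # increment A reports on exit: for level > 300 the current level's increment,
--     # otherwise the table increment of level + 1
--     if level > 300:
--         return 150 + (level - 299) // 2
--     if level >= 300:
--         return 151
--     if level >= 20:
--         return 100
--     if level >= 10:
--         return 75
--     if level >= 5:
--         return 50
--     return 25
--
-- def _points(level):
--     # closed-form sum of the per-level increments for levels 2..level
--     if level > 300:
--         m = level - 300
--         return 29100 + 150 * m + (m + 1) ** 2 // 4
--     if level > 20:
--         return 1100 + 100 * (level - 20)
--     if level > 10:
--         return 350 + 75 * (level - 10)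
--     if level > 5:
--         return 100 + 50 * (level - 5)
--     return 25 * (level - 1)
--
-- def mr_to_points(level):
--     return _next_increment(level), _points(level)
-- ===== Notes on version B (the rewrite author's own statement) =====
-- stated objective: faster
-- what changed: Replaced the per-level accumulation loop with closed-form piecewise arithmetic (series sums, including the closed form floor((m+1)^2/4) for the sum of ceil(k/2)).
-- outside the precondition, e.g. on mr_to_points(0): A does not finish within the time limit, B returns (25, -25)
import Mathlib
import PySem

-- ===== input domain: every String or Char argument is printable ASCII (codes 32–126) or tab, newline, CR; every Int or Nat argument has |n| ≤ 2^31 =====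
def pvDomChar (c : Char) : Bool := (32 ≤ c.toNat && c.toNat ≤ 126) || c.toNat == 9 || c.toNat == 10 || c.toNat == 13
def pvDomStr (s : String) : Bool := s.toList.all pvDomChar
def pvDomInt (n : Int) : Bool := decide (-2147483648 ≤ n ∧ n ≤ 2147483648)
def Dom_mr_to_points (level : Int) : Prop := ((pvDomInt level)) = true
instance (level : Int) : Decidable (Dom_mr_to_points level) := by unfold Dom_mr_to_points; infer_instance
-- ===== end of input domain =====

-- ===== PORT A =====
-- B computes A's answer by closed-form piecewise arithmetic instead of A's per-level loop.
-- math.ceil((i-300)*0.5): exact as (n+1)//2 for positive n (floats are exact for halves in this range)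
def pvCeilHalf (n : Int) : Int := PySem.Int.floordiv (n + 1) 2

def pvIncA (i : Int) : Int :=
  if i ≤ 5 then 25
  else if 6 ≤ i ∧ i ≤ 10 then 50
  else if 11 ≤ i ∧ i ≤ 20 then 75
  else if 21 ≤ i ∧ i ≤ 300 then 100
  else if 300 < i then 150 + pvCeilHalf (i - 300)
  else 0  -- unreachable for integer i: the Python elif chain covers all ints

-- the while-True loop; fuel counts the remaining iterations (Pre_ guarantees it suffices; fuel 0 is unreachable)
def pvLoopA (level points i : Int) : Nat → Int × Int
  | 0 => (0, points)
  | f + 1 =>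
    let i' := i + 1
    let inc := pvIncA i'
    if i' = level + 1 then
      (if i' - 1 > 300 then 150 + pvCeilHalf (i' - 1 - 300) else inc, points)
    else pvLoopA level (points + inc) i' f

def mr_to_points (level : Int) : List Int :=
  let r := pvLoopA level 0 1 level.toNat
  [r.1, r.2]

-- ===== PORT B =====
def pvNextInc (level : Int) : Int :=
  if level > 300 then 150 + PySem.Int.floordiv (level - 299) 2
  else if level ≥ 300 then 151
  else if level ≥ 20 then 100
  else if level ≥ 10 then 75
  else if level ≥ 5 then 50
  else 25

-- Source B's local name m = level - 300 is inlined
def pvPoints (level : Int) : Int :=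
  if level > 300 then
    29100 + 150 * (level - 300) + PySem.Int.floordiv ((level - 300 + 1) ^ 2) 4
  else if level > 20 then 1100 + 100 * (level - 20)
  else if level > 10 then 350 + 75 * (level - 10)
  else if level > 5 then 100 + 50 * (level - 5)
  else 25 * (level - 1)

def mr_to_points_alt (level : Int) : List Int := [pvNextInc level, pvPoints level]

-- ===== PRECONDITION & SPEC =====
-- Pre_ excludes level <= 0, on which A's while-True loop never reaches its break and A diverges (returns nothing).
def Pre_mr_to_points (level : Int) : Prop := 1 ≤ level
instance (level : Int) : Decidable (Pre_mr_to_points level) := by unfold Pre_mr_to_points; infer_instance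
def pvWitness_mr_to_points : Int := 7

def Spec_mr_to_points (level : Int) (out : List Int) : Prop := out = mr_to_points_alt level
instance (level : Int) (out : List Int) : Decidable (Spec_mr_to_points level out) := by unfold Spec_mr_to_points; infer_instance

-- ===== CLAIM (what is proved, stated in full; the proofs are below) =====
def Claim_equal_mr_to_points : Prop := ∀ (level : Int), Dom_mr_to_points level → Pre_mr_to_points level → Spec_mr_to_points level (mr_to_points level)

-- ===== LEMMAS AND PROOFS =====
-- the first component A returns, as a function of level
def pvFin (level : Int) : Int :=
  if level > 300 then 150 + pvCeilHalf (level - 300) else pvIncA (level + 1)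

theorem pvLoopA_rec (level : Int) :
    ∀ (g : Nat) (i p : Int), 1 ≤ i → i + (g : Int) + 1 = level + 1 →
      pvLoopA (level + 1) p i (g + 2) =
        (pvFin (level + 1), (pvLoopA level p i (g + 1)).2 + pvIncA (level + 1)) := by
  intro g
  induction g with
  | zero =>
    intro i p hi hig
    have hi' : i = level := by omega
    subst hi'
    have step1 : pvLoopA (i + 1) p i 2 =
        pvLoopA (i + 1) (p + pvIncA (i + 1)) (i + 1) 1 := by
      simp only [pvLoopA]
      rw [if_neg (by omega : ¬ (i + 1 = i + 1 + 1))]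
    have step2 : pvLoopA (i + 1) (p + pvIncA (i + 1)) (i + 1) 1 =
        ((if i + 1 + 1 - 1 > 300 then 150 + pvCeilHalf (i + 1 + 1 - 1 - 300)
          else pvIncA (i + 1 + 1)), p + pvIncA (i + 1)) := by
      simp only [pvLoopA]
      simp
    have step3 : (pvLoopA i p i 1).2 = p := by
      simp only [pvLoopA]
      simp
    rw [step1, step2, step3]
    unfold pvFin
    rw [show i + 1 + 1 - 1 = i + 1 from by ring]
  | succ g ih =>
    intro i p hi hig
    have h1 : ¬ (i + 1 = (level + 1) + 1) := by omega
    have h2 : ¬ (i + 1 = level + 1) := by omega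
    have stepL : pvLoopA (level + 1) p i (g + 1 + 2) =
        pvLoopA (level + 1) (p + pvIncA (i + 1)) (i + 1) (g + 2) := by
      simp only [pvLoopA]
      rw [if_neg h1]
    have stepR : pvLoopA level p i (g + 1 + 1) =
        pvLoopA level (p + pvIncA (i + 1)) (i + 1) (g + 1) := by
      simp only [pvLoopA]
      rw [if_neg h2]
    rw [stepL, stepR, ih (i + 1) (p + pvIncA (i + 1)) (by omega) (by push_cast at hig ⊢; omega)]

theorem mr_to_points_succ (level : Int) (h : 1 ≤ level) :
    mr_to_points (level + 1) =
      [pvFin (level + 1), (pvLoopA level 0 1 level.toNat).2 + pvIncA (level + 1)] := by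
  have hg : level.toNat = (level.toNat - 1) + 1 := by omega
  have ht : (level + 1).toNat = (level.toNat - 1) + 2 := by omega
  simp only [mr_to_points, ht]
  rw [pvLoopA_rec level (level.toNat - 1) 1 0 (by omega) (by omega)]
  rw [← hg]

-- key division identity: floor((m+2)^2/4) = floor((m+1)^2/4) + floor((m+2)/2)
theorem pv_fd_sq (m : Int) :
    PySem.Int.floordiv ((m + 2) ^ 2) 4 =
      PySem.Int.floordiv ((m + 1) ^ 2) 4 + PySem.Int.floordiv (m + 2) 2 := by
  simp only [PySem.Int.floordiv_eq_ediv_of_pos (show (0:Int) < 4 by norm_num),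
             PySem.Int.floordiv_eq_ediv_of_pos (show (0:Int) < 2 by norm_num)]
  rcases Int.even_or_odd m with ⟨q, hq⟩ | ⟨q, hq⟩ <;> subst hq
  · have e1 : (q + q + 2) ^ 2 = (q ^ 2 + 2 * q + 1) * 4 := by ring
    have e2 : (q + q + 1) ^ 2 = (q ^ 2 + q) * 4 + 1 := by ring
    have e3 : q + q + 2 = (q + 1) * 2 := by ring
    rw [e1, e2, e3]
    generalize (q : Int) ^ 2 = t
    omega
  · have e1 : (2 * q + 1 + 2) ^ 2 = (q ^ 2 + 3 * q + 2) * 4 + 1 := by ring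
    have e2 : (2 * q + 1 + 1) ^ 2 = (q ^ 2 + 2 * q + 1) * 4 := by ring
    have e3 : 2 * q + 1 + 2 = (q + 1) * 2 + 1 := by ring
    rw [e1, e2, e3]
    generalize (q : Int) ^ 2 = t
    omega

theorem pvNextInc_eq_pvFin (level : Int) (h : 1 ≤ level) : pvNextInc level = pvFin level := by
  unfold pvNextInc pvFin pvIncA pvCeilHalf
  by_cases h3 : level > 300
  · rw [if_pos h3, if_pos h3]
    congr 2
    ring
  · rw [if_neg h3, if_neg h3]
    by_cases h300 : level = 300
    · subst h300; decide
    · split_ifs <;> omega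

theorem pvPoints_succ (level : Int) (h : 1 ≤ level) :
    pvPoints (level + 1) = pvPoints level + pvIncA (level + 1) := by
  rcases lt_or_ge level 300 with hlt | hge
  · unfold pvPoints pvIncA pvCeilHalf
    split_ifs <;> omega
  · rcases eq_or_lt_of_le hge with heq | hgt
    · rw [← heq]; decide
    · have key := pv_fd_sq (level - 300)
      unfold pvPoints pvIncA pvCeilHalf
      rw [if_pos (by omega : level + 1 > 300), if_pos (by omega : level > 300),
          if_neg (by omega), if_neg (by omega), if_neg (by omega), if_neg (by omega),
          if_pos (by omega : (300:Int) < level + 1)]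
      ring_nf at key ⊢
      omega

theorem main_eq : ∀ (n : Nat), mr_to_points ((n : Int) + 1) = mr_to_points_alt ((n : Int) + 1) := by
  intro n
  induction n with
  | zero => decide
  | succ n ih =>
    have h1 : (1 : Int) ≤ (n : Int) + 1 := by omega
    have hc : ((n + 1 : Nat) : Int) + 1 = ((n : Int) + 1) + 1 := by push_cast; ring
    have hpts : (pvLoopA ((n : Int) + 1) 0 1 ((n : Int) + 1).toNat).2 = pvPoints ((n : Int) + 1) := by
      have h2 := congrArg (fun l => l[1]!) ih
      simpa [mr_to_points, mr_to_points_alt] using h2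
    rw [hc, mr_to_points_succ _ h1, hpts, ← pvPoints_succ _ h1]
    simp only [mr_to_points_alt]
    rw [pvNextInc_eq_pvFin _ (by omega)]

-- ===== VERDICT (by name: the statement is the Claim_ definition above) =====
theorem mr_to_points_spec : Claim_equal_mr_to_points := by
  intro level _ hpre
  unfold Pre_mr_to_points at hpre
  unfold Spec_mr_to_points
  have hn : level = (((level - 1).toNat : Nat) : Int) + 1 := by omega
  rw [hn]
  exact main_eq (level - 1).toNat
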